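-- pv_equiv track=rewrite | github.com/ddri/banjo-midison | src/banjo/voice_leading.py | choose_voicing_position
-- ===== SOURCE A (Python) =====
-- def _voicing_distance(candidate: list[int], previous: list[int]) -> int:
--     """
--     Sum of nearest-neighbor MIDI distances from each candidate note to
--     the previous chord. Asymmetric: two candidate notes may share the same
--     nearest neighbor. See spec section "Voicing distance" for why this is
--     the chosen metric and what its limitations are.
--     """
--     return sum(min(abs(c - p) for p in previous) for c in candidate)
--
-- _K_RANGE = (-2, -1, 0, 1, 2)
--
-- def choose_voicing_position(
--     candidates: list[list[int]],
--     previous_notes: list[int],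
-- ) -> tuple[int, list[int]]:
--     """
--     Pick the (inversion, octave-shift) combination that minimizes voicing
--     distance from previous_notes.
--
--     `candidates` is a list of voiced note lists, one per candidate inversion
--     (caller has already applied build_chord + apply_voicing for each).
--     The function expands the cross-product with k in {-2, -1, 0, +1, +2}
--     internally and returns (inv_idx, shifted_notes) for the winning candidate.
--
--     Tie-break order: smaller inversion index, then smaller |k|, then
--     smaller signed k.
--
--     Precondition: previous_notes is non-empty. The function is not called
--     for chord 1; that path renders directly with the request-level seed.
--     """
--     if not previous_notes:
--         raise ValueError("previous_notes must be non-empty")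
--     if not candidates:
--         raise ValueError("candidates must be non-empty")
--
--     best_score: int | None = None
--     best_notes: list[int] | None = None
--     best_inv: int | None = None
--     best_key: tuple[int, int, int] | None = None
--
--     for inv_idx, voiced in enumerate(candidates):
--         for k in _K_RANGE:
--             shifted = [n + 12 * k for n in voiced]
--             score = _voicing_distance(shifted, previous_notes)
--             tie_key = (inv_idx, abs(k), k)
--             if best_score is None or score < best_score or (
--                 score == best_score and tie_key < best_key
--             ):
--                 best_score = score
--                 best_notes = shifted
--                 best_inv = inv_idx
--                 best_key = tie_key
--
--     assert best_notes is not None and best_inv is not None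
--     return best_inv, best_notes
-- ===== SOURCE B (Python) =====
-- _KS = (0, -1, 1, -2, 2)  # octave shifts in tie-break priority order: smaller |k| first, then smaller k
--
--
-- def choose_voicing_position(
--     candidates: list[list[int]],
--     previous_notes: list[int],
-- ) -> tuple[int, list[int]]:
--     prev = sorted(previous_notes)
--     np_ = len(prev)
--
--     def nearest(n: int) -> int:
--         # distance from n to its nearest element of the sorted list prev (binary search)
--         lo, hi = 0, np_
--         while lo < hi:
--             mid = (lo + hi) // 2
--             if prev[mid] < n:
--                 lo = mid + 1
--             else:
--                 hi = mid
--         if lo == 0: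
--             return prev[0] - n
--         if lo == np_:
--             return n - prev[np_ - 1]
--         return min(prev[lo] - n, n - prev[lo - 1])
--
--     _, best_i = min(
--         (sum(nearest(n + 12 * k) for n in voiced), 5 * inv + j)
--         for inv, voiced in enumerate(candidates)
--         for j, k in enumerate(_KS)
--     )
--     inv, j = divmod(best_i, 5)
--     return inv, [n + 12 * _KS[j] for n in candidates[inv]]
-- ===== Notes on version B (the rewrite author's own statement) =====
-- stated objective: faster
-- what changed: B sorts previous_notes once and finds each shifted note's nearest previous note by binary search instead of a linear scan, and selects the winner as a single min over (score, priority-index) pairs instead of A's four-variable running-best loop over the (inversion, k) cross product.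
import Mathlib
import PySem

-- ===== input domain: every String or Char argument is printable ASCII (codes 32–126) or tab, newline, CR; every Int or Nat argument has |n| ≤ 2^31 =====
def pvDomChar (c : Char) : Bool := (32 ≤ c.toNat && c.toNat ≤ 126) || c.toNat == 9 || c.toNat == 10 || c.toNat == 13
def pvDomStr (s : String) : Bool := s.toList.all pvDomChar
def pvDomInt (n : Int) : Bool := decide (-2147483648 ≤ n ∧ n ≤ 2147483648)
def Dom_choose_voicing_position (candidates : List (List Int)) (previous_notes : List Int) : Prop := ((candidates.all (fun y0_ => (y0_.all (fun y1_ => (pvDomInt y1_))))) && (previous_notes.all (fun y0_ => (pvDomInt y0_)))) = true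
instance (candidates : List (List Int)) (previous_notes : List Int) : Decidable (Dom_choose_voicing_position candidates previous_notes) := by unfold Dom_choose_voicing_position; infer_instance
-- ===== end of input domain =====

-- B replaces A's inner linear scan over previous_notes by one sort plus a binary search per
-- shifted note, and A's four-variable running-best loop by a single min over (score, index) pairs.
-- Objective: faster (measured faster in a timing run at the larger sizes).

-- ===== PORT A =====

-- A's `min(abs(c - p) for p in previous)`: the `.getD 0` is unreachable under Pre_ (previous ≠ []).
def pvVoicingDistance (candidate : List Int) (previous : List Int) : Int :=
  (candidate.map (fun c =>
    (PySem.List.min? (previous.map (fun p => |c - p|)) (fun x => x)).getD 0)).sum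

def pvKA : List Int := [-2, -1, 0, 1, 2]     -- _K_RANGE

-- Python tuple comparison `tie_key < best_key` on (int, int, int)
def pvTkLt (a b : Int × Int × Int) : Bool :=
  decide (a.1 < b.1 ∨ (a.1 = b.1 ∧ (a.2.1 < b.2.1 ∨ (a.2.1 = b.2.1 ∧ a.2.2 < b.2.2))))

-- A's loop state (best_score, best_notes, best_inv, best_key); best_key is set whenever
-- best_score is, so the `.getD (0,0,0)` is unreachable (Python compares keys only then).
def choose_voicing_position (candidates : List (List Int)) (previous_notes : List Int) : Int × List Int :=
  let st := (PySem.List.enumerate candidates).foldl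
    (fun st iv =>
      pvKA.foldl (fun st k =>
        let shifted := iv.2.map (fun n => n + 12 * k)
        let score := pvVoicingDistance shifted previous_notes
        let tk : Int × Int × Int := (iv.1, |k|, k)
        match st with
        | (none, _, _, _) => (some score, some shifted, some iv.1, some tk)
        | (some bs, bn, bi, bk) =>
          if score < bs ∨ (score = bs ∧ pvTkLt tk (bk.getD (0, 0, 0)) = true) then
            (some score, some shifted, some iv.1, some tk)
          else (some bs, bn, bi, bk)) st)
    ((none, none, none, none) :
      Option Int × Option (List Int) × Option Int × Option (Int × Int × Int))
  ((st.2.2.1).getD 0, (st.2.1).getD [])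

-- ===== PORT B =====

def pvKS : List Int := [0, -1, 1, -2, 2]     -- _KS: octave shifts in tie-break priority order

-- Source B's hand-written lo/hi binary-search loop is exactly CPython's bisect_left, i.e.
-- PySem.List.bisectLeft; the three-way return below is Source B's `nearest`.  The list indexings
-- are in range whenever prev ≠ [] (guaranteed under Pre_; Python raises IndexError otherwise).
def pvNearest (prev : List Int) (n : Int) : Int :=
  let np := prev.length
  let lo := PySem.List.bisectLeft prev n
  if lo = 0 then PySem.List.pyGetD prev 0 0 - n
  else if lo = np then n - PySem.List.pyGetD prev ((np : Int) - 1) 0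
  else min (PySem.List.pyGetD prev (lo : Int) 0 - n) (n - PySem.List.pyGetD prev ((lo : Int) - 1) 0)

-- the generator fed to min(): (score, 5*inv + j) for each inversion and each (j, k) in enumerate(_KS)
def pvPairs (candidates : List (List Int)) (prev : List Int) : List (Int × Int) :=
  (PySem.List.enumerate candidates).flatMap (fun iv =>
    (PySem.List.enumerate pvKS).map (fun jk =>
      ((iv.2.map (fun n => pvNearest prev (n + 12 * jk.2))).sum, 5 * iv.1 + jk.1)))

def choose_voicing_position_alt (candidates : List (List Int)) (previous_notes : List Int) : Int × List Int :=
  let prev := PySem.List.sorted previous_notes (fun x => x)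
  match PySem.List.min2? (pvPairs candidates prev) (fun q => q.1) (fun q => q.2) with
  | none => (0, [])     -- Python's min raises ValueError here; unreachable under Pre_
  | some q =>
    let inv := PySem.Int.floordiv q.2 5     -- divmod(best_i, 5); 5 ≠ 0
    let j := PySem.Int.mod q.2 5
    (inv, (PySem.List.pyGetD candidates inv []).map
            (fun n => n + 12 * PySem.List.pyGetD pvKS j 0))

-- ===== PRECONDITION & SPEC =====

-- Pre_ excludes exactly the inputs where Python A raises ValueError (its two explicit guards):
-- empty candidates or empty previous_notes.  B raises there too (ValueError / IndexError).
def Pre_choose_voicing_position (candidates : List (List Int)) (previous_notes : List Int) : Prop :=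
  candidates ≠ [] ∧ previous_notes ≠ []
instance (candidates : List (List Int)) (previous_notes : List Int) : Decidable (Pre_choose_voicing_position candidates previous_notes) := by unfold Pre_choose_voicing_position; infer_instance

def pvWitness_choose_voicing_position : List (List Int) × List Int := ([[60, 64, 67], [64, 67, 72]], [62, 65, 69])

def Spec_choose_voicing_position (candidates : List (List Int)) (previous_notes : List Int) (out : Int × List Int) : Prop := out = choose_voicing_position_alt candidates previous_notes
instance (candidates : List (List Int)) (previous_notes : List Int) (out : Int × List Int) : Decidable (Spec_choose_voicing_position candidates previous_notes out) := by unfold Spec_choose_voicing_position; infer_instance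

-- ===== CLAIM (what is proved, stated in full; the proofs are below) =====
def Claim_equal_choose_voicing_position : Prop := ∀ (candidates : List (List Int)) (previous_notes : List Int), Dom_choose_voicing_position candidates previous_notes → Pre_choose_voicing_position candidates previous_notes → Spec_choose_voicing_position candidates previous_notes (choose_voicing_position candidates previous_notes)

-- ===== LEMMAS AND PROOFS =====

-- ---- generic "keep the first strict minimum" fold (the shape of both loops and of min2?) ----

def pvPick {α : Type} (p : α → α → Bool) (acc : Option α) (x : α) : Option α :=
  match acc with
  | none => some x
  | some m => if p x m = true then some x else some m

theorem pvPick_foldl_some {α : Type} (p : α → α → Bool) :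
    ∀ (l : List α) (b : α), ∃ m, l.foldl (pvPick p) (some b) = some m := by
  intro l
  induction l with
  | nil => exact fun b => ⟨b, rfl⟩
  | cons x t ih =>
    intro b
    simp only [List.foldl_cons, pvPick]
    split <;> exact ih _

theorem pvPick_spec {α : Type} (p : α → α → Bool)
    (hIrr : ∀ a, p a a = false)
    (hTrans : ∀ a b c, p a b = true → p b c = true → p a c = true)
    (hTransNeg : ∀ a b c, p a b = false → p b c = false → p a c = false) :
    ∀ (l : List α) (b m : α), l.foldl (pvPick p) (some b) = some m →
      (m = b ∨ m ∈ l) ∧ p b m = false ∧ ∀ y ∈ l, p y m = false := by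
  intro l
  induction l with
  | nil =>
    intro b m h
    simp only [List.foldl_nil, Option.some.injEq] at h
    subst h
    exact ⟨Or.inl rfl, hIrr _, by simp⟩
  | cons x t ih =>
    intro b m h
    simp only [List.foldl_cons, pvPick] at h
    by_cases hx : p x b = true
    · rw [if_pos hx] at h
      obtain ⟨hm, hbm, hall⟩ := ih x m h
      refine ⟨?_, ?_, ?_⟩
      · rcases hm with rfl | hm
        · exact Or.inr (List.mem_cons_self)
        · exact Or.inr (List.mem_cons_of_mem _ hm)
      · by_contra hbm'
        have hbm2 : p b m = true := by
          cases hpb : p b m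
          · exact absurd hpb hbm'
          · rfl
        have := hTrans x b m hx hbm2
        rw [this] at hbm
        exact Bool.true_eq_false.mp hbm
      · intro y hy
        rcases List.mem_cons.mp hy with rfl | hy
        · exact hbm
        · exact hall y hy
    · rw [if_neg hx] at h
      have hx' : p x b = false := by
        cases hpb : p x b
        · rfl
        · exact absurd hpb hx
      obtain ⟨hm, hbm, hall⟩ := ih b m h
      refine ⟨?_, hbm, ?_⟩
      · rcases hm with rfl | hm
        · exact Or.inl rfl
        · exact Or.inr (List.mem_cons_of_mem _ hm)
      · intro y hy
        rcases List.mem_cons.mp hy with rfl | hy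
        · exact hTransNeg y b m hx' hbm
        · exact hall y hy

theorem pvPick_spec_none {α : Type} (p : α → α → Bool)
    (hIrr : ∀ a, p a a = false)
    (hTrans : ∀ a b c, p a b = true → p b c = true → p a c = true)
    (hTransNeg : ∀ a b c, p a b = false → p b c = false → p a c = false) :
    ∀ (l : List α) (m : α), l.foldl (pvPick p) none = some m →
      m ∈ l ∧ ∀ y ∈ l, p y m = false := by
  intro l m h
  cases l with
  | nil => simp at h
  | cons x t =>
    simp only [List.foldl_cons, pvPick] at h
    obtain ⟨hm, hxm, hall⟩ := pvPick_spec p hIrr hTrans hTransNeg t x m h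
    refine ⟨?_, ?_⟩
    · rcases hm with rfl | hm
      · exact List.mem_cons_self
      · exact List.mem_cons_of_mem _ hm
    · intro y hy
      rcases List.mem_cons.mp hy with rfl | hy
      · exact hxm
      · exact hall y hy

theorem pvPick_foldl_none {α : Type} (p : α → α → Bool) (l : List α)
    (h : l.foldl (pvPick p) none = none) : l = [] := by
  cases l with
  | nil => rfl
  | cons x t =>
    simp only [List.foldl_cons, pvPick] at h
    obtain ⟨m, hm⟩ := pvPick_foldl_some p t x
    rw [hm] at h
    exact absurd h (by simp)

-- ---- A as a pick-fold over an explicit entry list ----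

abbrev pvStA := Option Int × Option (List Int) × Option Int × Option (Int × Int × Int)
abbrev pvEnt := (Int × Int × Int × Int) × List Int

-- lexicographic < on A's full comparison key (score, inv, |k|, k)
def pvP4 (a b : pvEnt) : Bool :=
  decide (a.1.1 < b.1.1) || (decide (a.1.1 = b.1.1) && pvTkLt a.1.2 b.1.2)

def pvEA (candidates : List (List Int)) (previous : List Int) : List pvEnt :=
  (PySem.List.enumerate candidates).flatMap (fun iv =>
    pvKA.map (fun k =>
      ((pvVoicingDistance (iv.2.map (fun n => n + 12 * k)) previous, iv.1, |k|, k),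
        iv.2.map (fun n => n + 12 * k))))

def pvRel (st : pvStA) (acc : Option pvEnt) : Prop :=
  (st = (none, none, none, none) ∧ acc = none) ∨
  (∃ s tk nts, st = (some s, some nts, some tk.1, some tk) ∧ acc = some ((s, tk), nts))

theorem pvFoldl_rel {α β γ : Type} (R : β → γ → Prop) (f : β → α → β) (g : γ → α → γ)
    (hstep : ∀ st acc x, R st acc → R (f st x) (g acc x)) :
    ∀ (l : List α) (st : β) (acc : γ), R st acc → R (l.foldl f st) (l.foldl g acc) := by
  intro l
  induction l with
  | nil => intro st acc h; exact h
  | cons x t ih => intro st acc h; exact ih _ _ (hstep st acc x h)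

theorem pvA_eq_pick (candidates : List (List Int)) (previous : List Int) :
    choose_voicing_position candidates previous =
      match (pvEA candidates previous).foldl (pvPick pvP4) none with
      | none => (0, [])
      | some e => (e.1.2.1, e.2) := by
  have hrel : pvRel
      ((PySem.List.enumerate candidates).foldl
        (fun st iv =>
          pvKA.foldl (fun st k =>
            let shifted := iv.2.map (fun n => n + 12 * k)
            let score := pvVoicingDistance shifted previous
            let tk : Int × Int × Int := (iv.1, |k|, k)
            match st with
            | (none, _, _, _) => (some score, some shifted, some iv.1, some tk)
            | (some bs, bn, bi, bk) =>
              if score < bs ∨ (score = bs ∧ pvTkLt tk (bk.getD (0, 0, 0)) = true) then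
                (some score, some shifted, some iv.1, some tk)
              else (some bs, bn, bi, bk)) st)
        ((none, none, none, none) : pvStA))
      ((pvEA candidates previous).foldl (pvPick pvP4) none) := by
    rw [pvEA, List.foldl_flatMap]
    apply pvFoldl_rel pvRel _ _ ?_ _ _ _ (Or.inl ⟨rfl, rfl⟩)
    intro st acc iv h
    rw [List.foldl_map]
    apply pvFoldl_rel pvRel _ _ ?_ _ _ _ h
    intro st acc k h
    rcases h with ⟨rfl, rfl⟩ | ⟨s, tk, nts, rfl, rfl⟩
    · exact Or.inr ⟨_, (iv.1, |k|, k), _, rfl, rfl⟩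
    · simp only [pvPick]
      by_cases hc : pvVoicingDistance (iv.2.map (fun n => n + 12 * k)) previous < s ∨
          (pvVoicingDistance (iv.2.map (fun n => n + 12 * k)) previous = s ∧
            pvTkLt (iv.1, |k|, k) ((some tk).getD (0, 0, 0)) = true)
      · rw [if_pos hc]
        have hp4 : pvP4 ((pvVoicingDistance (iv.2.map (fun n => n + 12 * k)) previous, iv.1, |k|, k),
            iv.2.map (fun n => n + 12 * k)) ((s, tk), nts) = true := by
          simp only [pvP4, Option.getD_some] at hc ⊢
          rcases hc with h1 | ⟨h1, h2⟩
          · simp [h1]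
          · simp [h1, h2]
        rw [if_pos hp4]
        exact Or.inr ⟨_, (iv.1, |k|, k), _, rfl, rfl⟩
      · rw [if_neg hc]
        have hp4 : pvP4 ((pvVoicingDistance (iv.2.map (fun n => n + 12 * k)) previous, iv.1, |k|, k),
            iv.2.map (fun n => n + 12 * k)) ((s, tk), nts) = false := by
          simp only [pvP4, Option.getD_some] at hc ⊢
          simp only [not_or, not_and] at hc
          obtain ⟨h1, h2⟩ := hc
          by_cases he : pvVoicingDistance (iv.2.map (fun n => n + 12 * k)) previous = s
          · simp [he, h2 he]
          · simp [h1, he]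
        rw [if_neg (by simp [hp4])]
        exact Or.inr ⟨s, tk, nts, rfl, rfl⟩
  rcases hrel with ⟨h1, h2⟩ | ⟨s, tk, nts, h1, h2⟩
  · rw [h2]
    exact congrArg (fun st : pvStA => ((st.2.2.1).getD 0, (st.2.1).getD ([] : List Int))) h1
  · rw [h2]
    exact congrArg (fun st : pvStA => ((st.2.2.1).getD 0, (st.2.1).getD ([] : List Int))) h1

-- ---- B's min2? as a pick-fold ----

def pvP2 (a b : Int × Int) : Bool :=
  decide (a.1 < b.1) || (!decide (b.1 < a.1) && decide (a.2 < b.2))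

theorem pvB_min2_eq_pick (l : List (Int × Int)) :
    PySem.List.min2? l (fun q => q.1) (fun q => q.2) = l.foldl (pvPick pvP2) none := rfl

-- ---- order facts for the two comparison predicates ----

theorem pvP4_irrefl (a : pvEnt) : pvP4 a a = false := by
  simp [pvP4, pvTkLt]

theorem pvP4_trans (a b c : pvEnt) (h1 : pvP4 a b = true) (h2 : pvP4 b c = true) :
    pvP4 a c = true := by
  obtain ⟨⟨a1, a2, a3, a4⟩, _⟩ := a
  obtain ⟨⟨b1, b2, b3, b4⟩, _⟩ := b
  obtain ⟨⟨c1, c2, c3, c4⟩, _⟩ := c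
  simp only [pvP4, pvTkLt] at h1 h2 ⊢
  simp only [Bool.or_eq_true, Bool.and_eq_true, decide_eq_true_eq] at h1 h2 ⊢
  omega

theorem pvP4_transNeg (a b c : pvEnt) (h1 : pvP4 a b = false) (h2 : pvP4 b c = false) :
    pvP4 a c = false := by
  obtain ⟨⟨a1, a2, a3, a4⟩, _⟩ := a
  obtain ⟨⟨b1, b2, b3, b4⟩, _⟩ := b
  obtain ⟨⟨c1, c2, c3, c4⟩, _⟩ := c
  simp only [pvP4, pvTkLt] at h1 h2 ⊢
  simp only [Bool.or_eq_false_iff, Bool.and_eq_false_iff, decide_eq_false_iff_not,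
    not_or, not_and, not_lt] at h1 h2 ⊢
  omega

theorem pvP2_irrefl (a : Int × Int) : pvP2 a a = false := by
  simp [pvP2]

theorem pvP2_trans (a b c : Int × Int) (h1 : pvP2 a b = true) (h2 : pvP2 b c = true) :
    pvP2 a c = true := by
  obtain ⟨a1, a2⟩ := a; obtain ⟨b1, b2⟩ := b; obtain ⟨c1, c2⟩ := c
  simp only [pvP2, Bool.or_eq_true, Bool.and_eq_true, Bool.not_eq_eq_eq_not, Bool.not_true,
    decide_eq_true_eq, decide_eq_false_iff_not, not_lt] at h1 h2 ⊢
  omega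

theorem pvP2_transNeg (a b c : Int × Int) (h1 : pvP2 a b = false) (h2 : pvP2 b c = false) :
    pvP2 a c = false := by
  obtain ⟨a1, a2⟩ := a; obtain ⟨b1, b2⟩ := b; obtain ⟨c1, c2⟩ := c
  simp only [pvP2, Bool.or_eq_false_iff, Bool.and_eq_false_iff, Bool.not_eq_eq_eq_not,
    Bool.not_false, decide_eq_true_eq, decide_eq_false_iff_not, not_lt] at h1 h2 ⊢
  omega

theorem pvP2_antisymm (a b : Int × Int) (h1 : pvP2 a b = false) (h2 : pvP2 b a = false) :
    a = b := by
  obtain ⟨a1, a2⟩ := a; obtain ⟨b1, b2⟩ := b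
  simp only [pvP2, Bool.or_eq_false_iff, Bool.and_eq_false_iff, Bool.not_eq_eq_eq_not,
    Bool.not_false, decide_eq_true_eq, decide_eq_false_iff_not, not_lt, Prod.mk.injEq] at h1 h2 ⊢
  omega

-- ---- nearest-neighbour distance equals A's linear-scan minimum ----

theorem pvNearest_correct (previous : List Int) (h : previous ≠ []) (c : Int) :
    pvNearest (PySem.List.sorted previous (fun x => x)) c =
      (PySem.List.min? (previous.map (fun p => |c - p|)) (fun x => x)).getD 0 := by
  set sp := PySem.List.sorted previous (fun x => x) with hsp
  have hperm : sp.Perm previous := PySem.List.sorted_perm previous (fun x => x) false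
  have hne : sp ≠ [] := by
    intro hnil
    rw [hnil] at hperm
    exact h (hperm.symm.eq_nil)
  have hlen : 0 < sp.length := List.length_pos_iff.mpr hne
  obtain ⟨m, hm⟩ : ∃ m, PySem.List.min? (previous.map (fun p => |c - p|)) (fun x => x) = some m := by
    cases hmm : PySem.List.min? (previous.map (fun p => |c - p|)) (fun x => x) with
    | none =>
      rw [PySem.List.min?_eq_none_iff] at hmm
      exact absurd (List.map_eq_nil_iff.mp hmm) h
    | some m => exact ⟨m, rfl⟩
  have hmmem : m ∈ previous.map (fun p => |c - p|) := PySem.List.min?_mem hm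
  have hmmin : ∀ y ∈ previous.map (fun p => |c - p|), m ≤ y := by
    intro y hy
    exact PySem.List.min?_isMin hm y hy
  rw [hm, Option.getD_some]
  have hmemmap : ∀ y, y ∈ previous.map (fun p => |c - p|) ↔ y ∈ sp.map (fun p => |c - p|) :=
    fun y => ((hperm.map (fun p => |c - p|)).mem_iff).symm
  obtain ⟨hble, hblt, hbge⟩ := PySem.List.bisectLeft_spec sp c (PySem.List.sorted_pairwise previous (fun x => x))
  have hmono : ∀ (p q : Nat) (hpq : p ≤ q) (hq : q < sp.length), sp[p]'(Nat.lt_of_le_of_lt hpq hq) ≤ sp[q] := by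
    intro p q hpq hq
    exact PySem.List.sorted_id_getElem_mono previous hpq (by simpa [hsp] using hq)
  have key : pvNearest sp c ∈ sp.map (fun p => |c - p|) ∧
      ∀ y ∈ sp.map (fun p => |c - p|), pvNearest sp c ≤ y := by
    by_cases h0 : PySem.List.bisectLeft sp c = 0
    · -- every element is ≥ c; nearest is sp[0]
      have hv : pvNearest sp c = sp[0] - c := by
        simp only [pvNearest]
        rw [if_pos h0]
        rw [PySem.List.pyGetD_eq_getElem sp 0 (by omega) (by omega)]
        simp
      have hc0 : c ≤ sp[0] := hbge 0 hlen (by omega)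
      constructor
      · rw [hv, List.mem_map]
        refine ⟨sp[0], List.getElem_mem hlen, ?_⟩
        rw [abs_of_nonpos (by omega)]
        ring
      · intro y hy
        rw [List.mem_map] at hy
        obtain ⟨p, hp, rfl⟩ := hy
        obtain ⟨j, hj, rfl⟩ := List.mem_iff_getElem.mp hp
        have h1 := hbge j hj (by omega)
        have h2 := hmono 0 j (by omega) hj
        rw [hv, abs_of_nonpos (by omega)]
        omega
    · by_cases hN : PySem.List.bisectLeft sp c = sp.length
      · -- every element is < c; nearest is the last one
        have hlast : ((sp.length : Int) - 1).toNat = sp.length - 1 := by omega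
        have hlt : sp.length - 1 < sp.length := by omega
        have hv : pvNearest sp c = c - sp[sp.length - 1] := by
          simp only [pvNearest]
          rw [if_neg h0, if_pos hN]
          rw [PySem.List.pyGetD_eq_getElem sp 0 (by omega) (by omega)]
          simp only [hlast]
        have hcl : sp[sp.length - 1] < c := hblt _ hlt (by omega)
        constructor
        · rw [hv, List.mem_map]
          refine ⟨sp[sp.length - 1], List.getElem_mem hlt, ?_⟩
          rw [abs_of_nonneg (by omega)]
        · intro y hy
          rw [List.mem_map] at hy
          obtain ⟨p, hp, rfl⟩ := hy
          obtain ⟨j, hj, rfl⟩ := List.mem_iff_getElem.mp hp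
          have h1 := hblt j hj (by omega)
          have h2 := hmono j (sp.length - 1) (by omega) hlt
          rw [hv, abs_of_nonneg (by omega)]
          omega
      · -- 0 < lo < length: nearest is the closer of the two neighbours of the insertion point
        set lo := PySem.List.bisectLeft sp c with hlo
        have hlopos : 0 < lo := Nat.pos_of_ne_zero h0
        have hlolt : lo < sp.length := lt_of_le_of_ne hble hN
        have htn1 : ((lo : Int)).toNat = lo := by omega
        have htn2 : ((lo : Int) - 1).toNat = lo - 1 := by omega
        have hv : pvNearest sp c = min (sp[lo]'hlolt - c) (c - sp[lo - 1]'(by omega)) := by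
          simp only [pvNearest]
          rw [if_neg h0, if_neg hN]
          rw [PySem.List.pyGetD_eq_getElem sp 0 (by omega) (by omega),
              PySem.List.pyGetD_eq_getElem sp 0 (by omega) (by omega)]
          simp only [← hlo, htn1, htn2]
        have hgec : c ≤ sp[lo]'hlolt := hbge lo hlolt (by omega)
        have hltc : sp[lo - 1]'(by omega) < c := hblt (lo - 1) (by omega) (by omega)
        constructor
        · rw [hv, List.mem_map]
          rcases le_total (sp[lo]'hlolt - c) (c - sp[lo - 1]'(by omega)) with hle | hle
          · refine ⟨sp[lo]'hlolt, List.getElem_mem hlolt, ?_⟩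
            rw [abs_of_nonpos (by omega)]
            omega
          · refine ⟨sp[lo - 1]'(by omega), List.getElem_mem (by omega), ?_⟩
            rw [abs_of_nonneg (by omega)]
            omega
        · intro y hy
          rw [List.mem_map] at hy
          obtain ⟨p, hp, rfl⟩ := hy
          obtain ⟨j, hj, rfl⟩ := List.mem_iff_getElem.mp hp
          rw [hv]
          by_cases hjlo : j < lo
          · have h1 := hblt j hj hjlo
            have h2 := hmono j (lo - 1) (by omega) (by omega)
            rw [abs_of_nonneg (by omega)]
            have := min_le_right (sp[lo]'hlolt - c) (c - sp[lo - 1]'(by omega))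
            omega
          · have h1 := hbge j hj (by omega)
            have h2 := hmono lo j (by omega) hj
            rw [abs_of_nonpos (by omega)]
            have := min_le_left (sp[lo]'hlolt - c) (c - sp[lo - 1]'(by omega))
            omega
  have h1 : m ≤ pvNearest sp c := hmmin _ ((hmemmap _).mpr key.1)
  have h2 : pvNearest sp c ≤ m := key.2 _ ((hmemmap _).mp hmmem)
  omega

theorem pvScore_eq (previous : List Int) (h : previous ≠ []) (voiced : List Int) (k : Int) :
    (voiced.map (fun n => pvNearest (PySem.List.sorted previous (fun x => x)) (n + 12 * k))).sum =
      pvVoicingDistance (voiced.map (fun n => n + 12 * k)) previous := by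
  rw [pvVoicingDistance, List.map_map]
  congr 1
  exact List.map_congr_left (fun n _ => pvNearest_correct previous h (n + 12 * k))

-- ---- the bridge between A's entries and B's pairs ----

def pvJ (k : Int) : Int :=
  if k = 0 then 0 else if k = -1 then 1 else if k = 1 then 2 else if k = -2 then 3 else 4

def pvPsi (e : pvEnt) : Int × Int :=
  (e.1.1, 5 * e.1.2.1 + pvJ e.1.2.2.2)

theorem pvBlock_iff (previous : List Int) (h : previous ≠ []) (iv : Int × List Int) (q : Int × Int) :
    q ∈ (PySem.List.enumerate pvKS).map (fun jk =>
        ((iv.2.map (fun n => pvNearest (PySem.List.sorted previous (fun x => x)) (n + 12 * jk.2))).sum,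
          5 * iv.1 + jk.1)) ↔
      ∃ k ∈ pvKA, pvPsi ((pvVoicingDistance (iv.2.map (fun n => n + 12 * k)) previous, iv.1, |k|, k),
        iv.2.map (fun n => n + 12 * k)) = q := by
  have hS : ∀ k, (iv.2.map (fun n => pvNearest (PySem.List.sorted previous (fun x => x)) (n + 12 * k))).sum =
      pvVoicingDistance (iv.2.map (fun n => n + 12 * k)) previous :=
    fun k => pvScore_eq previous h iv.2 k
  have henum : PySem.List.enumerate pvKS = [(0, 0), (1, -1), (2, 1), (3, -2), (4, 2)] := by decide
  rw [henum]
  simp only [pvKA, pvPsi, pvJ, List.map_cons, List.map_nil, List.mem_cons, List.not_mem_nil,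
    or_false, hS]
  norm_num
  tauto

theorem pvMem_pairs_iff (candidates : List (List Int)) (previous : List Int)
    (h : previous ≠ []) (q : Int × Int) :
    q ∈ pvPairs candidates (PySem.List.sorted previous (fun x => x)) ↔
      ∃ e ∈ pvEA candidates previous, pvPsi e = q := by
  simp only [pvPairs, pvEA, List.mem_flatMap]
  constructor
  · rintro ⟨iv, hiv, hq⟩
    obtain ⟨k, hk, hψ⟩ := (pvBlock_iff previous h iv q).mp hq
    exact ⟨_, ⟨iv, hiv, List.mem_map.mpr ⟨k, hk, rfl⟩⟩, hψ⟩
  · rintro ⟨e, ⟨iv, hiv, he⟩, hψ⟩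
    obtain ⟨k, hk, rfl⟩ := List.mem_map.mp he
    exact ⟨iv, hiv, (pvBlock_iff previous h iv q).mpr ⟨k, hk, hψ⟩⟩

theorem pvMem_EA (candidates : List (List Int)) (previous : List Int)
    (e : pvEnt) (he : e ∈ pvEA candidates previous) :
    ∃ (i : Nat) (hi : i < candidates.length) (k : Int), k ∈ pvKA ∧
      e = ((pvVoicingDistance (candidates[i].map (fun n => n + 12 * k)) previous, (i : Int), |k|, k),
            candidates[i].map (fun n => n + 12 * k)) := by
  simp only [pvEA, List.mem_flatMap] at he
  obtain ⟨iv, hiv, he⟩ := he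
  rw [PySem.List.mem_enumerate_iff] at hiv
  obtain ⟨i, hi, rfl⟩ := hiv
  rw [List.mem_map] at he
  obtain ⟨k, hk, rfl⟩ := he
  exact ⟨i, hi, k, hk, by simp⟩

theorem pvPsi_iso (e f : pvEnt)
    (candidates : List (List Int)) (previous : List Int)
    (he : e ∈ pvEA candidates previous) (hf : f ∈ pvEA candidates previous) :
    pvP2 (pvPsi e) (pvPsi f) = pvP4 e f := by
  obtain ⟨i1, hi1, k1, hk1, rfl⟩ := pvMem_EA candidates previous e he
  obtain ⟨i2, hi2, k2, hk2, rfl⟩ := pvMem_EA candidates previous f hf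
  simp only [pvKA, List.mem_cons, List.not_mem_nil, or_false] at hk1 hk2
  rw [Bool.eq_iff_iff]
  rcases hk1 with rfl | rfl | rfl | rfl | rfl <;> rcases hk2 with rfl | rfl | rfl | rfl | rfl <;>
    · simp only [pvP2, pvP4, pvPsi, pvTkLt, pvJ]
      norm_num
      omega

-- ---- final assembly ----

theorem pvJ_range (k : Int) (hk : k ∈ pvKA) : 0 ≤ pvJ k ∧ pvJ k < 5 := by
  simp only [pvKA, List.mem_cons, List.not_mem_nil, or_false] at hk
  rcases hk with rfl | rfl | rfl | rfl | rfl <;> decide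

theorem pvKS_at_J (k : Int) (hk : k ∈ pvKA) : PySem.List.pyGetD pvKS (pvJ k) 0 = k := by
  simp only [pvKA, List.mem_cons, List.not_mem_nil, or_false] at hk
  rcases hk with rfl | rfl | rfl | rfl | rfl <;> decide

-- ===== VERDICT (by name: the statement is the Claim_ definition above) =====
theorem choose_voicing_position_spec : Claim_equal_choose_voicing_position := by
  unfold Claim_equal_choose_voicing_position
  intro candidates previous _ hpre
  obtain ⟨hc, hp⟩ := hpre
  unfold Spec_choose_voicing_position
  rw [pvA_eq_pick]
  -- the A-side fold returns a minimum entry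
  cases hfa : (pvEA candidates previous).foldl (pvPick pvP4) none with
  | none =>
    exfalso
    have := pvPick_foldl_none pvP4 _ hfa
    rw [pvEA, List.flatMap_eq_nil_iff] at this
    cases candidates with
    | nil => exact hc rfl
    | cons x cs =>
      have hx := this (0, x) (by rw [PySem.List.enumerate_cons]; exact List.mem_cons_self)
      simp [pvKA] at hx
  | some mA =>
    obtain ⟨hmem, hmin⟩ := pvPick_spec_none pvP4 pvP4_irrefl pvP4_trans pvP4_transNeg _ _ hfa
    -- the B-side fold returns a minimum pair
    rw [choose_voicing_position_alt]
    rw [pvB_min2_eq_pick]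
    cases hfb : (pvPairs candidates (PySem.List.sorted previous (fun x => x))).foldl (pvPick pvP2) none with
    | none =>
      exfalso
      have hnil := pvPick_foldl_none pvP2 _ hfb
      have : pvPsi mA ∈ pvPairs candidates (PySem.List.sorted previous (fun x => x)) :=
        (pvMem_pairs_iff candidates previous hp _).mpr ⟨mA, hmem, rfl⟩
      rw [hnil] at this
      exact List.not_mem_nil this
    | some mB =>
      obtain ⟨hmemB, hminB⟩ := pvPick_spec_none pvP2 pvP2_irrefl pvP2_trans pvP2_transNeg _ _ hfb
      -- mB is exactly the image of mA
      have hψmem : pvPsi mA ∈ pvPairs candidates (PySem.List.sorted previous (fun x => x)) :=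
        (pvMem_pairs_iff candidates previous hp _).mpr ⟨mA, hmem, rfl⟩
      obtain ⟨e, heEA, heq⟩ := (pvMem_pairs_iff candidates previous hp _).mp hmemB
      have h1 : pvP2 (pvPsi mA) mB = false := hminB _ hψmem
      have h2 : pvP2 mB (pvPsi mA) = false := by
        rw [← heq, pvPsi_iso e mA candidates previous heEA hmem]
        exact hmin e heEA
      have hBA : mB = pvPsi mA := pvP2_antisymm mB (pvPsi mA) h2 h1
      -- decode
      obtain ⟨i, hi, k, hk, rfl⟩ := pvMem_EA candidates previous mA hmem
      obtain ⟨hj0, hj5⟩ := pvJ_range k hk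
      have hψ : pvPsi ((pvVoicingDistance (candidates[i].map (fun n => n + 12 * k)) previous, (i : Int), |k|, k),
          candidates[i].map (fun n => n + 12 * k)) =
          (pvVoicingDistance (candidates[i].map (fun n => n + 12 * k)) previous, 5 * (i : Int) + pvJ k) := rfl
      rw [hBA, hψ]
      have hdiv : PySem.Int.floordiv (5 * (i : Int) + pvJ k) 5 = (i : Int) := by
        rw [PySem.Int.floordiv_eq_iff_of_pos (by omega)]
        omega
      have hmod : PySem.Int.mod (5 * (i : Int) + pvJ k) 5 = pvJ k := by
        have := PySem.Int.floordiv_mul_add_mod (5 * (i : Int) + pvJ k) 5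
        rw [hdiv] at this
        omega
      simp only [hdiv, hmod, pvKS_at_J k hk]
      have hget : PySem.List.pyGetD candidates ((i : Nat) : Int) [] = candidates[i] := by
        rw [PySem.List.pyGetD_natCast]
        exact List.getD_eq_getElem _ _ hi
      rw [hget]
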